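-- pv_equiv track=rewrite | github.com/PanJianTing/LeetCode | 3310_RemoveMethodsFromProject.py | remainingMethods
-- ===== SOURCE A (Python) =====
-- from collections import defaultdict
--
-- def remainingMethods(N: int, k: int, graph: list[list[int]]) -> list[int]:
--     g = defaultdict(list)
--
--     for st, end in graph:
--         g[st].append(end)
--
--     visit = set([k])
--     res = []
--
--     def dfs(cur):
--         visit.add(cur)
--         for next_node in g[cur]:
--             if next_node in visit:
--                 continue
--             dfs(next_node)
--
--     dfs(k)
--
--     for node in range(N):
--         if node in visit:
--             continue
--
--         for next_node in g[node]:
--             if next_node in visit: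
--                 return [i for i in range(N)]
--         res.append(node)
--
--     return res
-- ===== SOURCE B (Python) =====
-- def remainingMethods(N: int, k: int, graph: list[list[int]]) -> list[int]:
--     g = {}
--     for edge in graph:
--         g.setdefault(edge[0], []).append(edge[1])
--
--     # iterative DFS with an explicit stack instead of recursion
--     visit = {k}
--     stack = [k]
--     while stack:
--         cur = stack.pop()
--         for nxt in g.get(cur, []):
--             if nxt not in visit:
--                 visit.add(nxt)
--                 stack.append(nxt)
--
--     nums = list(range(N))
--     if any(node not in visit and any(e in visit for e in g.get(node, []))
--            for node in nums):
--         return nums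
--     return [node for node in nums if node not in visit]
-- ===== Notes on version B (the rewrite author's own statement) =====
-- stated objective: alternative
-- what changed: The recursive dfs closure is replaced by an iterative explicit-stack traversal (visited marked on push), and the final node-by-node scan with an early return is replaced by a single any(...) test followed by a list-comprehension filter.
import Mathlib
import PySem

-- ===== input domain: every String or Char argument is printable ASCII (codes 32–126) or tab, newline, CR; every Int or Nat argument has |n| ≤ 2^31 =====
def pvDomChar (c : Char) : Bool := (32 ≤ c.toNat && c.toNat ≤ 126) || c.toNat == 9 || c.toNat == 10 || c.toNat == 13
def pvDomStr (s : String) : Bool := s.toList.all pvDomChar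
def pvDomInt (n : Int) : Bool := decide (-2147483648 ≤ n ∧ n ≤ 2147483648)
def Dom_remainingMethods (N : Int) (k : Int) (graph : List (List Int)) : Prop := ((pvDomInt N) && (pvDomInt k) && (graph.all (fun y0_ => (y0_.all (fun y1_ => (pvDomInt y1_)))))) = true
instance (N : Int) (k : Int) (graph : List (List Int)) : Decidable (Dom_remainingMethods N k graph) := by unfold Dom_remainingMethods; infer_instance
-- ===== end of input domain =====

-- B replaces A's recursive dfs by an explicit-stack iterative traversal (mark on push) and the
-- node-by-node final scan with early return by one any-test plus a filter; return values agree,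
-- no argument is mutated by either version.

-- ===== PORT A =====
def buildG_A (graph : List (List Int)) : PySem.Dict Int (List Int) :=
  graph.foldl (fun g row =>
    match row with
    | st :: en :: _ => g.insert st (g.getD st [] ++ [en])
    | _ => g) PySem.Dict.empty

mutual
-- recursive dfs: visit.add(cur); recurse into unvisited neighbours (fuel proven sufficient below)
def dfsA (g : PySem.Dict Int (List Int)) : Nat → PySem.Set Int → Int → PySem.Set Int
  | 0, visit, _ => visit
  | fuel + 1, visit, cur => dfsListA g fuel (g.getD cur []) (PySem.Set.add visit cur)
  termination_by fuel _ _ => (fuel, 0)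

def dfsListA (g : PySem.Dict Int (List Int)) : Nat → List Int → PySem.Set Int → PySem.Set Int
  | _, [], visit => visit
  | fuel, n :: ns, visit =>
      dfsListA g fuel ns (if n ∈ visit then visit else dfsA g fuel visit n)
  termination_by fuel ns _ => (fuel, ns.length + 1)
end

-- the final 'for node in range(N)' loop with its early 'return [i for i in range(N)]'
def scanA (g : PySem.Dict Int (List Int)) (visit : PySem.Set Int) (N : Int) :
    List Int → List Int → List Int
  | [], res => res
  | node :: rest, res =>
    if decide (node ∈ visit) then scanA g visit N rest res
    else if (g.getD node []).any (fun nxt => decide (nxt ∈ visit)) then PySem.List.pyRange 0 N 1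
    else scanA g visit N rest (res ++ [node])

def remainingMethods (N : Int) (k : Int) (graph : List (List Int)) : List Int :=
  let g := buildG_A graph
  let visit := dfsA g (graph.length + 2) (PySem.Set.ofList [k]) k
  scanA g visit N (PySem.List.pyRange 0 N 1) []

-- ===== PORT B =====
def buildG_B (graph : List (List Int)) : PySem.Dict Int (List Int) :=
  graph.foldl (fun g edge =>
    match edge with
    | s :: e :: _ => g.insert s (g.getD s [] ++ [e])
    | _ => g) PySem.Dict.empty

-- while stack: cur = stack.pop(); push/mark unvisited neighbours (fuel proven sufficient below)
def stackLoopB (g : PySem.Dict Int (List Int)) : Nat → List Int → PySem.Set Int → PySem.Set Int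
  | 0, _, visit => visit
  | _ + 1, [], visit => visit
  | fuel + 1, cur :: rest, visit =>
      let p := (g.getD cur []).foldl
        (fun (p : List Int × PySem.Set Int) nxt =>
          if decide (nxt ∈ p.2) then p else (nxt :: p.1, PySem.Set.add p.2 nxt))
        (rest, visit)
      stackLoopB g fuel p.1 p.2

def remainingMethods_alt (N : Int) (k : Int) (graph : List (List Int)) : List Int :=
  let g := buildG_B graph
  let visit := stackLoopB g (graph.length + 3) [k] (PySem.Set.ofList [k])
  let nums := PySem.List.pyRange 0 N 1
  if nums.any (fun node =>
      !decide (node ∈ visit) && (g.getD node []).any (fun e => decide (e ∈ visit)))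
  then nums
  else nums.filter (fun node => !decide (node ∈ visit))

-- ===== PRECONDITION & SPEC =====
-- Pre_ excludes exactly the graphs containing a row whose length is not 2, on which
-- Python A's 'for st, end in graph' raises ValueError (A returns on every other input).
def Pre_remainingMethods (N : Int) (k : Int) (graph : List (List Int)) : Prop :=
  ∀ row ∈ graph, row.length = 2
instance (N : Int) (k : Int) (graph : List (List Int)) : Decidable (Pre_remainingMethods N k graph) := by
  unfold Pre_remainingMethods; infer_instance

def pvWitness_remainingMethods : Int × Int × List (List Int) := (3, 0, [[0, 1], [1, 2]])

def Spec_remainingMethods (N : Int) (k : Int) (graph : List (List Int)) (out : List Int) : Prop :=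
  out = remainingMethods_alt N k graph
instance (N : Int) (k : Int) (graph : List (List Int)) (out : List Int) : Decidable (Spec_remainingMethods N k graph out) := by
  unfold Spec_remainingMethods; infer_instance

-- ===== CLAIM (what is proved, stated in full; the proofs are below) =====
def Claim_equal_remainingMethods : Prop := ∀ (N : Int) (k : Int) (graph : List (List Int)), Dom_remainingMethods N k graph → Pre_remainingMethods N k graph → Spec_remainingMethods N k graph (remainingMethods N k graph)

-- ===== LEMMAS AND PROOFS =====

-- reachability from k along the edges stored in g
inductive Reach (g : PySem.Dict Int (List Int)) (k : Int) : Int → Prop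
  | base : Reach g k k
  | step {a b : Int} : Reach g k a → b ∈ PySem.Dict.getD g a [] → Reach g k b

-- number of elements of the universe U not yet visited
def cnt (U : List Int) (vis : List Int) : Nat :=
  (U.filter (fun u => !decide (u ∈ vis))).length

lemma cnt_le_of_subset (U vis vis' : List Int) (h : ∀ x ∈ vis, x ∈ vis') :
    cnt U vis' ≤ cnt U vis := by
  induction U with
  | nil => simp [cnt]
  | cons u U ih =>
    simp only [cnt, List.filter_cons] at *
    by_cases h1 : u ∈ vis'
    · by_cases h3 : u ∈ vis <;> simp [h1, h3] <;> omega
    · have h4 : u ∉ vis := fun hv => h1 (h _ hv)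
      simp [h1, h4]
      omega

lemma cnt_add_lt (U vis : List Int) (n : Int) (hU : n ∈ U) (hn : n ∉ vis) :
    cnt U (PySem.Set.add vis n) < cnt U vis := by
  induction U with
  | nil => cases hU
  | cons u U ih =>
    by_cases hu : u = n
    · subst hu
      have h1 : u ∈ PySem.Set.add vis u := by
        rw [PySem.Set.mem_add]; exact Or.inr rfl
      have h2 : cnt U (PySem.Set.add vis u) ≤ cnt U vis :=
        cnt_le_of_subset U vis _ (fun x hx => by rw [PySem.Set.mem_add]; exact Or.inl hx)
      simp only [cnt, List.filter_cons, h1, hn] at *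
      simp only [decide_true, Bool.not_true, Bool.false_eq_true, if_false,
        decide_false, Bool.not_false, if_true, List.length_cons]
      omega
    · have hU' : n ∈ U := by
        rcases List.mem_cons.mp hU with h | h
        · exact absurd h.symm hu
        · exact h
      have hmem : (u ∈ PySem.Set.add vis n) ↔ u ∈ vis := by
        rw [PySem.Set.mem_add]
        constructor
        · rintro (h | h)
          · exact h
          · exact absurd h hu
        · exact Or.inl
      have := ih hU'
      by_cases h3 : u ∈ vis
      · simp only [cnt, List.filter_cons, h3, hmem.mpr h3] at *
        simpa using this
      · have h4 : u ∉ PySem.Set.add vis n := fun hx => h3 (hmem.mp hx)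
        simp only [cnt, List.filter_cons, h3, h4] at *
        simp only [decide_false, Bool.not_false, if_true, List.length_cons]
        omega

-- ---------- port A: recursive dfs ----------

def SA (g : PySem.Dict Int (List Int)) (P : Int → Prop) (fuel : Nat) : Prop :=
  ∀ vis cur, (∀ x ∈ vis, P x) → P cur → ∀ x ∈ dfsA g fuel vis cur, P x

def SL (g : PySem.Dict Int (List Int)) (P : Int → Prop) (fuel : Nat) : Prop :=
  ∀ ns vis, (∀ x ∈ vis, P x) → (∀ n ∈ ns, P n) → ∀ x ∈ dfsListA g fuel ns vis, P x

lemma sound_LfromA (g : PySem.Dict Int (List Int)) (P : Int → Prop) (fuel : Nat)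
    (hA : SA g P fuel) : SL g P fuel := by
  intro ns
  induction ns with
  | nil => intro vis hvis _ x hx; simp only [dfsListA] at hx; exact hvis x hx
  | cons n ns ih =>
    intro vis hvis hns x hx
    simp only [dfsListA] at hx
    by_cases h : n ∈ vis
    · simp only [h, if_pos] at hx
      exact ih vis hvis (fun m hm => hns m (by simp [hm])) x hx
    · simp only [h, if_false] at hx
      exact ih _ (hA vis n hvis (hns n (by simp))) (fun m hm => hns m (by simp [hm])) x hx

lemma sound_A (g : PySem.Dict Int (List Int)) (P : Int → Prop)
    (hP : ∀ a b, P a → b ∈ PySem.Dict.getD g a [] → P b) :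
    ∀ fuel, SA g P fuel := by
  intro fuel
  induction fuel with
  | zero => intro vis cur hvis _ x hx; simp only [dfsA] at hx; exact hvis x hx
  | succ fuel ih =>
    intro vis cur hvis hcur x hx
    simp only [dfsA] at hx
    refine sound_LfromA g P fuel ih _ _ ?_ ?_ x hx
    · intro y hy
      rw [PySem.Set.mem_add] at hy
      rcases hy with h | h
      · exact hvis y h
      · exact h ▸ hcur
    · exact fun b hb => hP cur b hcur hb

def PA (g : PySem.Dict Int (List Int)) (U : List Int) (fuel : Nat) : Prop :=
  ∀ vis cur, cnt U (PySem.Set.add vis cur) < fuel →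
    (∀ x ∈ vis, x ∈ dfsA g fuel vis cur) ∧
    cur ∈ dfsA g fuel vis cur ∧
    (∀ b ∈ PySem.Dict.getD g cur [], b ∈ dfsA g fuel vis cur) ∧
    (∀ v ∈ dfsA g fuel vis cur, v ∈ vis ∨ ∀ b ∈ PySem.Dict.getD g v [], b ∈ dfsA g fuel vis cur)

def PL (g : PySem.Dict Int (List Int)) (U : List Int) (fuel : Nat) : Prop :=
  ∀ ns vis, (∀ n ∈ ns, n ∈ U) → cnt U vis ≤ fuel →
    (∀ x ∈ vis, x ∈ dfsListA g fuel ns vis) ∧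
    (∀ n ∈ ns, n ∈ dfsListA g fuel ns vis) ∧
    (∀ v ∈ dfsListA g fuel ns vis, v ∈ vis ∨ ∀ b ∈ PySem.Dict.getD g v [], b ∈ dfsListA g fuel ns vis)

lemma post_LfromA (g : PySem.Dict Int (List Int)) (U : List Int) (fuel : Nat)
    (hA : PA g U fuel) : PL g U fuel := by
  intro ns
  induction ns with
  | nil =>
    intro vis _ _
    refine ⟨fun x hx => by simpa [dfsListA] using hx, by simp, ?_⟩
    intro v hv
    simp only [dfsListA] at hv
    exact Or.inl hv
  | cons n ns ih =>
    intro vis hU hcnt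
    by_cases h : n ∈ vis
    · have heq : dfsListA g fuel (n :: ns) vis = dfsListA g fuel ns vis := by
        simp only [dfsListA, h, if_pos]
      obtain ⟨m1, m2, m3⟩ := ih vis (fun m hm => hU m (by simp [hm])) hcnt
      rw [heq]
      refine ⟨m1, ?_, m3⟩
      intro m hm
      rcases List.mem_cons.mp hm with rfl | hm
      · exact m1 m h
      · exact m2 m hm
    · have heq : dfsListA g fuel (n :: ns) vis = dfsListA g fuel ns (dfsA g fuel vis n) := by
        simp only [dfsListA, h, if_false]
      have hlt : cnt U (PySem.Set.add vis n) < fuel :=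
        lt_of_lt_of_le (cnt_add_lt U vis n (hU n (by simp)) h) hcnt
      obtain ⟨a1, a2, a3, a4⟩ := hA vis n hlt
      have hsub : ∀ x ∈ PySem.Set.add vis n, x ∈ dfsA g fuel vis n := by
        intro x hx
        rw [PySem.Set.mem_add] at hx
        rcases hx with hx | rfl
        · exact a1 x hx
        · exact a2
      have hcnt' : cnt U (dfsA g fuel vis n) ≤ fuel :=
        le_of_lt (lt_of_le_of_lt (cnt_le_of_subset U _ _ hsub) hlt)
      obtain ⟨m1, m2, m3⟩ := ih (dfsA g fuel vis n) (fun m hm => hU m (by simp [hm])) hcnt'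
      rw [heq]
      refine ⟨fun x hx => m1 x (a1 x hx), ?_, ?_⟩
      · intro m hm
        rcases List.mem_cons.mp hm with rfl | hm
        · exact m1 m a2
        · exact m2 m hm
      · intro v hv
        rcases m3 v hv with hvM | hcl
        · rcases a4 v hvM with hvv | hcl'
          · exact Or.inl hvv
          · exact Or.inr (fun b hb => m1 b (hcl' b hb))
        · exact Or.inr hcl

lemma post_A (g : PySem.Dict Int (List Int)) (U : List Int)
    (hU : ∀ x y, y ∈ PySem.Dict.getD g x [] → y ∈ U) :
    ∀ fuel, PA g U fuel := by
  intro fuel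
  induction fuel with
  | zero => intro vis cur h; omega
  | succ fuel ih =>
    intro vis cur h
    have heq : dfsA g (fuel + 1) vis cur =
        dfsListA g fuel (PySem.Dict.getD g cur []) (PySem.Set.add vis cur) := by
      simp only [dfsA]
    obtain ⟨m1, m2, m3⟩ := post_LfromA g U fuel ih (PySem.Dict.getD g cur [])
      (PySem.Set.add vis cur) (fun n hn => hU cur n hn) (by omega)
    rw [heq]
    refine ⟨fun x hx => m1 x (by rw [PySem.Set.mem_add]; exact Or.inl hx),
      m1 cur (by rw [PySem.Set.mem_add]; exact Or.inr rfl), m2, ?_⟩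
    intro v hv
    rcases m3 v hv with hva | hcl
    · rw [PySem.Set.mem_add] at hva
      rcases hva with hvv | rfl
      · exact Or.inl hvv
      · exact Or.inr m2
    · exact Or.inr hcl

-- ---------- port B: stack loop ----------

def pushStep (p : List Int × PySem.Set Int) (nxt : Int) : List Int × PySem.Set Int :=
  if decide (nxt ∈ p.2) then p else (nxt :: p.1, PySem.Set.add p.2 nxt)

lemma stackLoopB_cons (g : PySem.Dict Int (List Int)) (fuel : Nat) (cur : Int)
    (rest : List Int) (visit : PySem.Set Int) :
    stackLoopB g (fuel + 1) (cur :: rest) visit =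
      stackLoopB g fuel ((PySem.Dict.getD g cur []).foldl pushStep (rest, visit)).1
        ((PySem.Dict.getD g cur []).foldl pushStep (rest, visit)).2 := rfl

lemma fold_st_mono (ns : List Int) : ∀ st vis x, x ∈ st → x ∈ (ns.foldl pushStep (st, vis)).1 := by
  induction ns with
  | nil => intro st vis x hx; simpa using hx
  | cons n ns ih =>
    intro st vis x hx
    simp only [List.foldl_cons, pushStep]
    by_cases h : n ∈ vis
    · simp only [h, decide_true, if_pos]; exact ih st vis x hx
    · simp only [h, decide_false, Bool.false_eq_true, if_false]
      exact ih _ _ x (by simp [hx])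

lemma fold_vis_mono (ns : List Int) : ∀ st vis x, x ∈ vis → x ∈ (ns.foldl pushStep (st, vis)).2 := by
  induction ns with
  | nil => intro st vis x hx; simpa using hx
  | cons n ns ih =>
    intro st vis x hx
    simp only [List.foldl_cons, pushStep]
    by_cases h : n ∈ vis
    · simp only [h, decide_true, if_pos]; exact ih st vis x hx
    · simp only [h, decide_false, Bool.false_eq_true, if_false]
      exact ih _ _ x (by rw [PySem.Set.mem_add]; exact Or.inl hx)

lemma fold_vis_sub (ns : List Int) : ∀ st vis x, x ∈ (ns.foldl pushStep (st, vis)).2 →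
    x ∈ vis ∨ x ∈ ns := by
  induction ns with
  | nil => intro st vis x hx; exact Or.inl (by simpa using hx)
  | cons n ns ih =>
    intro st vis x hx
    simp only [List.foldl_cons, pushStep] at hx
    by_cases h : n ∈ vis
    · simp only [h, decide_true, if_pos] at hx
      rcases ih st vis x hx with h1 | h1
      · exact Or.inl h1
      · exact Or.inr (by simp [h1])
    · simp only [h, decide_false, Bool.false_eq_true, if_false] at hx
      rcases ih _ _ x hx with h1 | h1
      · rw [PySem.Set.mem_add] at h1
        rcases h1 with h1 | rfl
        · exact Or.inl h1
        · exact Or.inr (by simp)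
      · exact Or.inr (by simp [h1])

lemma fold_ns_vis (ns : List Int) : ∀ st vis x, x ∈ ns → x ∈ (ns.foldl pushStep (st, vis)).2 := by
  induction ns with
  | nil => intro st vis x hx; cases hx
  | cons n ns ih =>
    intro st vis x hx
    simp only [List.foldl_cons, pushStep]
    by_cases h : n ∈ vis
    · simp only [h, decide_true, if_pos]
      rcases List.mem_cons.mp hx with rfl | hx
      · exact fold_vis_mono ns st vis x h
      · exact ih st vis x hx
    · simp only [h, decide_false, Bool.false_eq_true, if_false]
      rcases List.mem_cons.mp hx with rfl | hx
      · exact fold_vis_mono ns _ _ x (by rw [PySem.Set.mem_add]; exact Or.inr rfl)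
      · exact ih _ _ x hx

lemma fold_st_sub (ns : List Int) : ∀ st vis x, x ∈ (ns.foldl pushStep (st, vis)).1 →
    x ∈ st ∨ x ∈ ns := by
  induction ns with
  | nil => intro st vis x hx; exact Or.inl (by simpa using hx)
  | cons n ns ih =>
    intro st vis x hx
    simp only [List.foldl_cons, pushStep] at hx
    by_cases h : n ∈ vis
    · simp only [h, decide_true, if_pos] at hx
      rcases ih st vis x hx with h1 | h1
      · exact Or.inl h1
      · exact Or.inr (by simp [h1])
    · simp only [h, decide_false, Bool.false_eq_true, if_false] at hx
      rcases ih _ _ x hx with h1 | h1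
      · rcases List.mem_cons.mp h1 with rfl | h1
        · exact Or.inr (by simp)
        · exact Or.inl h1
      · exact Or.inr (by simp [h1])

lemma fold_ns_st (ns : List Int) : ∀ st vis x, x ∈ ns →
    x ∈ vis ∨ x ∈ (ns.foldl pushStep (st, vis)).1 := by
  induction ns with
  | nil => intro st vis x hx; cases hx
  | cons n ns ih =>
    intro st vis x hx
    simp only [List.foldl_cons, pushStep]
    by_cases h : n ∈ vis
    · simp only [h, decide_true, if_pos]
      rcases List.mem_cons.mp hx with rfl | hx
      · exact Or.inl h
      · exact ih st vis x hx
    · simp only [h, decide_false, Bool.false_eq_true, if_false]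
      rcases List.mem_cons.mp hx with rfl | hx
      · exact Or.inr (fold_st_mono ns _ _ x (by simp))
      · rcases ih (n :: st) (PySem.Set.add vis n) x hx with h1 | h1
        · rw [PySem.Set.mem_add] at h1
          rcases h1 with h1 | rfl
          · exact Or.inl h1
          · exact Or.inr (fold_st_mono ns _ _ x (by simp))
        · exact Or.inr h1

lemma fold_st_in_vis (ns : List Int) : ∀ st vis, (∀ x ∈ st, x ∈ vis) →
    ∀ x ∈ (ns.foldl pushStep (st, vis)).1, x ∈ (ns.foldl pushStep (st, vis)).2 := by
  induction ns with
  | nil => intro st vis h x hx; exact h x (by simpa using hx)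
  | cons n ns ih =>
    intro st vis hsv
    simp only [List.foldl_cons, pushStep]
    by_cases h : n ∈ vis
    · simp only [h, decide_true, if_pos]; exact ih st vis hsv
    · simp only [h, decide_false, Bool.false_eq_true, if_false]
      refine ih _ _ ?_
      intro x hx
      rcases List.mem_cons.mp hx with rfl | hx
      · rw [PySem.Set.mem_add]; exact Or.inr rfl
      · rw [PySem.Set.mem_add]; exact Or.inl (hsv x hx)

lemma fold_measure (U : List Int) (ns : List Int) : ∀ st vis, (∀ n ∈ ns, n ∈ U) →
    (ns.foldl pushStep (st, vis)).1.length + cnt U (ns.foldl pushStep (st, vis)).2 ≤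
      st.length + cnt U vis := by
  induction ns with
  | nil => intro st vis _; simp
  | cons n ns ih =>
    intro st vis hU
    simp only [List.foldl_cons, pushStep]
    by_cases h : n ∈ vis
    · simp only [h, decide_true, if_pos]
      exact ih st vis (fun m hm => hU m (by simp [hm]))
    · simp only [h, decide_false, Bool.false_eq_true, if_false]
      have h1 := ih (n :: st) (PySem.Set.add vis n) (fun m hm => hU m (by simp [hm]))
      have h2 : cnt U (PySem.Set.add vis n) < cnt U vis :=
        cnt_add_lt U vis n (hU n (by simp)) h
      simp only [List.length_cons] at h1
      omega

lemma stackLoopB_sound (g : PySem.Dict Int (List Int)) (P : Int → Prop)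
    (hP : ∀ a b, P a → b ∈ PySem.Dict.getD g a [] → P b) :
    ∀ fuel stack vis, (∀ x ∈ stack, P x) → (∀ x ∈ vis, P x) →
      ∀ x ∈ stackLoopB g fuel stack vis, P x := by
  intro fuel
  induction fuel with
  | zero => intro stack vis _ hvis x hx; simp only [stackLoopB] at hx; exact hvis x hx
  | succ fuel ih =>
    intro stack vis hstack hvis x hx
    match stack with
    | [] => simp only [stackLoopB] at hx; exact hvis x hx
    | cur :: rest =>
      rw [stackLoopB_cons] at hx
      have hns : ∀ b ∈ PySem.Dict.getD g cur [], P b :=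
        fun b hb => hP cur b (hstack cur (by simp)) hb
      refine ih _ _ ?_ ?_ x hx
      · intro y hy
        rcases fold_st_sub _ _ _ y hy with h1 | h1
        · exact hstack y (by simp [h1])
        · exact hns y h1
      · intro y hy
        rcases fold_vis_sub _ _ _ y hy with h1 | h1
        · exact hvis y h1
        · exact hns y h1

lemma stackLoopB_post (g : PySem.Dict Int (List Int)) (U : List Int)
    (hU : ∀ x y, y ∈ PySem.Dict.getD g x [] → y ∈ U) :
    ∀ fuel stack vis, (∀ x ∈ stack, x ∈ vis) →
      (∀ v ∈ vis, v ∈ stack ∨ ∀ b ∈ PySem.Dict.getD g v [], b ∈ vis) →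
      stack.length + cnt U vis < fuel →
      (∀ x ∈ vis, x ∈ stackLoopB g fuel stack vis) ∧
      (∀ v ∈ stackLoopB g fuel stack vis, ∀ b ∈ PySem.Dict.getD g v [], b ∈ stackLoopB g fuel stack vis) := by
  intro fuel
  induction fuel with
  | zero => intro stack vis _ _ h; omega
  | succ fuel ih =>
    intro stack vis hsv hinv hm
    match stack with
    | [] =>
      simp only [stackLoopB]
      refine ⟨fun x hx => hx, ?_⟩
      intro v hv b hb
      rcases hinv v hv with h1 | h1
      · cases h1
      · exact h1 b hb
    | cur :: rest =>
      rw [stackLoopB_cons]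
      have hns : ∀ n ∈ PySem.Dict.getD g cur [], n ∈ U := fun n hn => hU cur n hn
      have hsv' : ∀ x ∈ ((PySem.Dict.getD g cur []).foldl pushStep (rest, vis)).1,
          x ∈ ((PySem.Dict.getD g cur []).foldl pushStep (rest, vis)).2 :=
        fold_st_in_vis _ _ _ (fun x hx => hsv x (by simp [hx]))
      have hinv' : ∀ v ∈ ((PySem.Dict.getD g cur []).foldl pushStep (rest, vis)).2,
          v ∈ ((PySem.Dict.getD g cur []).foldl pushStep (rest, vis)).1 ∨
            ∀ b ∈ PySem.Dict.getD g v [], b ∈ ((PySem.Dict.getD g cur []).foldl pushStep (rest, vis)).2 := by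
        intro v hv
        rcases fold_vis_sub _ _ _ v hv with h1 | h1
        · rcases hinv v h1 with h2 | h2
          · rcases List.mem_cons.mp h2 with rfl | h2
            · exact Or.inr (fun b hb => fold_ns_vis _ _ _ b hb)
            · exact Or.inl (fold_st_mono _ _ _ v h2)
          · exact Or.inr (fun b hb => fold_vis_mono _ _ _ b (h2 b hb))
        · rcases fold_ns_st _ _ _ v h1 with h2 | h2
          · rcases hinv v h2 with h3 | h3
            · rcases List.mem_cons.mp h3 with rfl | h3
              · exact Or.inr (fun b hb => fold_ns_vis _ _ _ b hb)
              · exact Or.inl (fold_st_mono _ _ _ v h3)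
            · exact Or.inr (fun b hb => fold_vis_mono _ _ _ b (h3 b hb))
          · exact Or.inl h2
      have hm' : ((PySem.Dict.getD g cur []).foldl pushStep (rest, vis)).1.length +
          cnt U ((PySem.Dict.getD g cur []).foldl pushStep (rest, vis)).2 < fuel := by
        have := fold_measure U _ rest vis hns
        simp only [List.length_cons] at hm
        omega
      obtain ⟨m1, m2⟩ := ih _ _ hsv' hinv' hm'
      exact ⟨fun x hx => m1 x (fold_vis_mono _ _ _ x hx), m2⟩

-- ---------- the built graph's values ----------

def endsOf (graph : List (List Int)) : List Int :=
  graph.filterMap (fun r => match r with | _ :: e :: _ => some e | _ => none)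

lemma endsOf_sub (graph : List (List Int)) (r : List Int) (y : Int) (hy : y ∈ endsOf graph) :
    y ∈ endsOf (r :: graph) := by
  simp only [endsOf, List.filterMap_cons]
  match r with
  | [] => exact hy
  | [_] => exact hy
  | _ :: e :: _ => exact List.mem_cons.mpr (Or.inr hy)

lemma buildG_sub (graph : List (List Int)) : ∀ (d : PySem.Dict Int (List Int)) (x y : Int),
    y ∈ PySem.Dict.getD (graph.foldl (fun g row =>
      match row with
      | st :: en :: _ => g.insert st (g.getD st [] ++ [en])
      | _ => g) d) x [] → y ∈ PySem.Dict.getD d x [] ∨ y ∈ endsOf graph := by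
  induction graph with
  | nil => intro d x y hy; exact Or.inl hy
  | cons r graph ih =>
    intro d x y hy
    simp only [List.foldl_cons] at hy
    rcases ih _ x y hy with h1 | h1
    · match r with
      | [] => exact Or.inl h1
      | [_] => exact Or.inl h1
      | st :: en :: rest =>
        rw [PySem.Dict.getD_insert] at h1
        by_cases hx : x = st
        · rw [if_pos hx] at h1
          rcases List.mem_append.mp h1 with h2 | h2
          · exact Or.inl (hx ▸ h2)
          · have : y = en := by simpa using h2
            subst this
            exact Or.inr (by simp [endsOf])
        · rw [if_neg hx] at h1
          exact Or.inl h1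
    · exact Or.inr (endsOf_sub graph r y h1)

-- ---------- assembly ----------

lemma ofList_single (k : Int) : PySem.Set.ofList [k] = [k] := rfl

lemma cnt_single_le (k : Int) (graph : List (List Int)) :
    cnt (k :: endsOf graph) [k] ≤ graph.length + 1 := by
  have h1 : cnt (k :: endsOf graph) [k] ≤ (k :: endsOf graph).length :=
    List.length_filter_le _ _
  have h2 : (endsOf graph).length ≤ graph.length := List.length_filterMap_le _ _
  simp only [List.length_cons] at h1
  omega

lemma hU_build (k : Int) (graph : List (List Int)) :
    ∀ x y, y ∈ PySem.Dict.getD (buildG_A graph) x [] → y ∈ k :: endsOf graph := by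
  intro x y hy
  rcases buildG_sub graph PySem.Dict.empty x y hy with h | h
  · simp [PySem.Dict.getD_empty] at h
  · exact List.mem_cons.mpr (Or.inr h)

lemma mem_visA (k : Int) (graph : List (List Int)) (x : Int) :
    x ∈ dfsA (buildG_A graph) (graph.length + 2) (PySem.Set.ofList [k]) k ↔
      Reach (buildG_A graph) k x := by
  have hcnt : cnt (k :: endsOf graph) (PySem.Set.add (PySem.Set.ofList [k]) k) <
      graph.length + 2 := by
    have h1 : PySem.Set.add (PySem.Set.ofList [k]) k = [k] := by
      rw [ofList_single]
      exact PySem.Set.add_of_mem (by simp)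
    rw [h1]
    have := cnt_single_le k graph
    omega
  obtain ⟨m1, m2, m3, m4⟩ := post_A (buildG_A graph) (k :: endsOf graph)
    (hU_build k graph) (graph.length + 2) (PySem.Set.ofList [k]) k hcnt
  constructor
  · intro hx
    refine sound_A (buildG_A graph) (Reach (buildG_A graph) k)
      (fun a b ha hb => Reach.step ha hb) (graph.length + 2) _ k ?_ Reach.base x hx
    intro y hy
    rw [ofList_single] at hy
    have : y = k := by simpa using hy
    exact this ▸ Reach.base
  · intro hr
    have hclosed : ∀ v ∈ dfsA (buildG_A graph) (graph.length + 2) (PySem.Set.ofList [k]) k,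
        ∀ b ∈ PySem.Dict.getD (buildG_A graph) v [],
          b ∈ dfsA (buildG_A graph) (graph.length + 2) (PySem.Set.ofList [k]) k := by
      intro v hv b hb
      rcases m4 v hv with h1 | h1
      · rw [ofList_single] at h1
        have : v = k := by simpa using h1
        subst this
        exact m3 b hb
      · exact h1 b hb
    induction hr with
    | base => exact m2
    | step ha hb ihr => exact hclosed _ ihr _ hb

lemma mem_visB (k : Int) (graph : List (List Int)) (x : Int) :
    x ∈ stackLoopB (buildG_B graph) (graph.length + 3) [k] (PySem.Set.ofList [k]) ↔
      Reach (buildG_A graph) k x := by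
  have hg : buildG_B graph = buildG_A graph := rfl
  rw [hg, ofList_single]
  have hm : [k].length + cnt (k :: endsOf graph) [k] < graph.length + 3 := by
    have := cnt_single_le k graph
    simp only [List.length_cons, List.length_nil]
    omega
  obtain ⟨m1, m2⟩ := stackLoopB_post (buildG_A graph) (k :: endsOf graph)
    (hU_build k graph) (graph.length + 3) [k] [k]
    (fun x hx => hx) (fun v hv => Or.inl hv) hm
  constructor
  · intro hx
    refine stackLoopB_sound (buildG_A graph) (Reach (buildG_A graph) k)
      (fun a b ha hb => Reach.step ha hb) (graph.length + 3) [k] [k] ?_ ?_ x hx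
    · intro y hy
      have : y = k := by simpa using hy
      exact this ▸ Reach.base
    · intro y hy
      have : y = k := by simpa using hy
      exact this ▸ Reach.base
  · intro hr
    induction hr with
    | base => exact m1 k (by simp)
    | step ha hb ihr => exact m2 _ ihr _ hb

lemma scanA_eq (g : PySem.Dict Int (List Int)) (vis : PySem.Set Int) (N : Int) :
    ∀ nodes res, scanA g vis N nodes res =
      if nodes.any (fun node =>
          !decide (node ∈ vis) && (PySem.Dict.getD g node []).any (fun e => decide (e ∈ vis)))
      then PySem.List.pyRange 0 N 1
      else res ++ nodes.filter (fun node => !decide (node ∈ vis)) := by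
  intro nodes
  induction nodes with
  | nil => intro res; simp [scanA]
  | cons node rest ih =>
    intro res
    by_cases h1 : node ∈ vis
    · simp only [scanA, h1, decide_true, if_pos, List.any_cons, List.filter_cons,
        Bool.not_true, Bool.false_and, Bool.false_or, Bool.false_eq_true, if_false]
      exact ih res
    · by_cases h2 : (PySem.Dict.getD g node []).any (fun e => decide (e ∈ vis))
      · simp only [scanA, h1, decide_false, Bool.false_eq_true, if_false, h2, if_pos,
          List.any_cons, Bool.not_false, Bool.true_and, Bool.true_or]
      · simp only [scanA, h1, decide_false, Bool.false_eq_true, if_false, h2,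
          List.any_cons, Bool.not_false, Bool.true_and, Bool.false_or, List.filter_cons,
          Bool.not_false, if_true]
        rw [ih (res ++ [node])]
        by_cases h3 : rest.any (fun node =>
            !decide (node ∈ vis) && (PySem.Dict.getD g node []).any (fun e => decide (e ∈ vis)))
        · simp [h3]
        · simp [h3, List.append_assoc]

-- ===== VERDICT (by name: the statement is the Claim_ definition above) =====
theorem remainingMethods_spec : Claim_equal_remainingMethods := by
  intro N k graph _ _
  unfold Spec_remainingMethods
  simp only [remainingMethods, remainingMethods_alt]
  have hg : buildG_B graph = buildG_A graph := rfl
  rw [scanA_eq, hg]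
  have hmem : ∀ x, (x ∈ dfsA (buildG_A graph) (graph.length + 2) (PySem.Set.ofList [k]) k) =
      (x ∈ stackLoopB (buildG_B graph) (graph.length + 3) [k] (PySem.Set.ofList [k])) := by
    intro x
    exact propext ((mem_visA k graph x).trans (mem_visB k graph x).symm)
  simp only [hmem, hg, List.nil_append]
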